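-- pv_equiv track=rewrite | github.com/Simha-Reddy/OMAR | OMAR_refactor/src/omar/services/transforms.py | _order_status_bucket
-- ===== SOURCE A (Python) =====
-- from typing import Any, Dict, List, Optional, Tuple
--
-- _ORDER_COMPLETED_TOKENS = (
--     'complete', 'completed', 'comp', 'resulted', 'done', 'finished', 'final', 'finalized'
-- )
--
-- _ORDER_DISCONTINUED_TOKENS = (
--     'discontinue', 'discontinued', 'cancel', 'cancelled', 'canceled', 'void', 'voided',
--     'stopped', 'stop', 'expired', 'exp', 'lapsed'
-- )
--
-- _ORDER_PENDING_TOKENS = (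
--     'pending', 'pend', 'hold', 'draft', 'unsigned', 'pre-release', 'prerelease',
--     'in process', 'inprocess', 'in-progress', 'new', 'not signed', 'requires signature'
-- )
--
-- _ORDER_ACTIVE_TOKENS = (
--     'active', 'current', 'released', 'processing', 'in effect', 'in-effect', 'in force',
--     'inforce'
-- )
--
-- def _order_status_bucket(name: Optional[str], code: Optional[str]) -> str:
--     tokens: list[str] = []
--     for raw in (name, code):
--         if raw is None:
--             continue
--         norm = str(raw).strip().lower()
--         if norm:
--             tokens.append(norm)
--     for token in tokens:
--         if any(marker in token for marker in _ORDER_DISCONTINUED_TOKENS):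
--             return 'discontinued'
--     for token in tokens:
--         if any(marker in token for marker in _ORDER_COMPLETED_TOKENS):
--             return 'completed'
--     for token in tokens:
--         if any(marker in token for marker in _ORDER_PENDING_TOKENS):
--             return 'pending'
--     for token in tokens:
--         if any(marker in token for marker in _ORDER_ACTIVE_TOKENS):
--             return 'active'
--     if tokens:
--         return 'other'
--     return 'unknown'
-- ===== SOURCE B (Python) =====
-- from typing import Optional
--
-- _ORDER_COMPLETED_TOKENS = (
--     'complete', 'completed', 'comp', 'resulted', 'done', 'finished', 'final', 'finalized'
-- )
--
-- _ORDER_DISCONTINUED_TOKENS = (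
--     'discontinue', 'discontinued', 'cancel', 'cancelled', 'canceled', 'void', 'voided',
--     'stopped', 'stop', 'expired', 'exp', 'lapsed'
-- )
--
-- _ORDER_PENDING_TOKENS = (
--     'pending', 'pend', 'hold', 'draft', 'unsigned', 'pre-release', 'prerelease',
--     'in process', 'inprocess', 'in-progress', 'new', 'not signed', 'requires signature'
-- )
--
-- _ORDER_ACTIVE_TOKENS = (
--     'active', 'current', 'released', 'processing', 'in effect', 'in-effect', 'in force',
--     'inforce'
-- )
--
-- # Buckets in priority order (lower index = higher priority).
-- _BUCKETS = (
--     ('discontinued', _ORDER_DISCONTINUED_TOKENS),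
--     ('completed', _ORDER_COMPLETED_TOKENS),
--     ('pending', _ORDER_PENDING_TOKENS),
--     ('active', _ORDER_ACTIVE_TOKENS),
-- )
--
--
-- def _order_status_bucket(name: Optional[str], code: Optional[str]) -> str:
--     tokens = [t for t in (str(r).strip().lower() for r in (name, code) if r is not None) if t]
--     if not tokens:
--         return 'unknown'
--     best = len(_BUCKETS)
--     for token in tokens:
--         for i, (_, markers) in enumerate(_BUCKETS):
--             if i < best and any(m in token for m in markers):
--                 best = i
--                 break
--     return _BUCKETS[best][0] if best < len(_BUCKETS) else 'other'
-- ===== Notes on version B (the rewrite author's own statement) =====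
-- stated objective: alternative
-- what changed: Replaces the four sequential whole-list scans (one per bucket, in priority order) with a single pass over the tokens that maintains the best (lowest) matching bucket index in a priority-ordered bucket table, then maps the final index to its name.
import Mathlib
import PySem

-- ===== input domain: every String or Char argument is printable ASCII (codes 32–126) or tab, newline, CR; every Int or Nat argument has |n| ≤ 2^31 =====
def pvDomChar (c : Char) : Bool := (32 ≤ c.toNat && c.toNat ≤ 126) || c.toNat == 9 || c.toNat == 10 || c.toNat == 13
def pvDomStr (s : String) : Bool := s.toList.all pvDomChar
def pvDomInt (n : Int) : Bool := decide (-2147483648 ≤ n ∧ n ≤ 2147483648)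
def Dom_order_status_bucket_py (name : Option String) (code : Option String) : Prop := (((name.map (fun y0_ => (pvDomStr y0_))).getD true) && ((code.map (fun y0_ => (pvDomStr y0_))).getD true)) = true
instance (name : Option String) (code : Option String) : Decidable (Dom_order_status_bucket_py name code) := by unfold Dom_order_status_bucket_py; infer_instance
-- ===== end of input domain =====

-- Port of A (four prioritized scans) vs B (one pass keeping the best bucket index); objective: alternative decomposition, same results.

def pvDisc : List String := ["discontinue", "discontinued", "cancel", "cancelled", "canceled", "void", "voided", "stopped", "stop", "expired", "exp", "lapsed"]
def pvComp : List String := ["complete", "completed", "comp", "resulted", "done", "finished", "final", "finalized"]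
def pvPend : List String := ["pending", "pend", "hold", "draft", "unsigned", "pre-release", "prerelease", "in process", "inprocess", "in-progress", "new", "not signed", "requires signature"]
def pvAct : List String := ["active", "current", "released", "processing", "in effect", "in-effect", "in force", "inforce"]

-- any(marker in token for marker in markers)
def pvHit (markers : List String) (token : String) : Bool :=
  markers.any (fun m => PySem.Str.isIn m token)

-- ===== PORT A =====
-- A's token-building loop over (name, code)
def pvTokensA (name : Option String) (code : Option String) : List String :=
  [name, code].foldl (fun acc raw =>
    match raw with
    | none => acc
    | some r =>
      let norm := PySem.Str.lower (PySem.Str.strip r)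
      if norm ≠ "" then acc ++ [norm] else acc) []

def order_status_bucket_py (name : Option String) (code : Option String) : String :=
  let tokens := pvTokensA name code
  if tokens.any (pvHit pvDisc) then "discontinued"
  else if tokens.any (pvHit pvComp) then "completed"
  else if tokens.any (pvHit pvPend) then "pending"
  else if tokens.any (pvHit pvAct) then "active"
  else if tokens ≠ [] then "other"
  else "unknown"

-- ===== PORT B =====
def pvBuckets : List (String × List String) :=
  [("discontinued", pvDisc), ("completed", pvComp), ("pending", pvPend), ("active", pvAct)]

-- B's inner loop over enumerate(_BUCKETS) with break: first i with i < best and a marker hit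
def pvInnerLoop (token : String) : Nat → List (String × List String) → Nat → Nat
  | _, [], best => best
  | i, (_, markers) :: rest, best =>
      if i < best ∧ pvHit markers token then i
      else pvInnerLoop token (i + 1) rest best

-- B's token comprehension
def pvTokensB (name : Option String) (code : Option String) : List String :=
  ([name, code].filterMap (fun r => r.map (fun s => PySem.Str.lower (PySem.Str.strip s)))).filter
    (fun t => t ≠ "")

def order_status_bucket_py_alt (name : Option String) (code : Option String) : String :=
  let tokens := pvTokensB name code
  if tokens = [] then "unknown"
  else
    let best := tokens.foldl (fun b t => pvInnerLoop t 0 pvBuckets b) pvBuckets.length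
    if best < pvBuckets.length then (pvBuckets.getD best ("", [])).1 else "other"

-- ===== PRECONDITION & SPEC =====
def Spec_order_status_bucket_py (name : Option String) (code : Option String) (out : String) : Prop := out = order_status_bucket_py_alt name code
instance (name : Option String) (code : Option String) (out : String) : Decidable (Spec_order_status_bucket_py name code out) := by unfold Spec_order_status_bucket_py; infer_instance

-- ===== CLAIM (what is proved, stated in full; the proofs are below) =====
def Claim_equal_order_status_bucket_py : Prop := ∀ (name : Option String) (code : Option String), Dom_order_status_bucket_py name code → Spec_order_status_bucket_py name code (order_status_bucket_py name code)

-- ===== LEMMAS AND PROOFS =====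

-- priority index of a single token (lowest matching bucket, 4 if none)
def pvF (t : String) : Nat :=
  if pvHit pvDisc t then 0
  else if pvHit pvComp t then 1
  else if pvHit pvPend t then 2
  else if pvHit pvAct t then 3
  else 4

-- priority index A's cascade computes for a token list
def pvCasc (l : List String) : Nat :=
  if l.any (pvHit pvDisc) then 0
  else if l.any (pvHit pvComp) then 1
  else if l.any (pvHit pvPend) then 2
  else if l.any (pvHit pvAct) then 3
  else 4

lemma pvCasc_le (l : List String) : pvCasc l ≤ 4 := by
  unfold pvCasc; split_ifs <;> omega

lemma pvInnerLoop_eq (t : String) (b : Nat) (hb : b ≤ 4) :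
    pvInnerLoop t 0 pvBuckets b = min b (pvF t) := by
  simp only [pvBuckets, pvInnerLoop, pvF]
  by_cases hd : pvHit pvDisc t <;>
    by_cases hc : pvHit pvComp t <;>
      by_cases hp : pvHit pvPend t <;>
        by_cases ha : pvHit pvAct t <;>
          simp [hd, hc, hp, ha] <;> first | omega | (split_ifs <;> omega)

lemma pvCasc_cons (t : String) (l : List String) :
    pvCasc (t :: l) = min (pvF t) (pvCasc l) := by
  unfold pvCasc pvF
  simp only [List.any_cons, Bool.or_eq_true]
  by_cases hd : pvHit pvDisc t <;>
    by_cases hc : pvHit pvComp t <;>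
      by_cases hp : pvHit pvPend t <;>
        by_cases ha : pvHit pvAct t <;>
          simp [hd, hc, hp, ha] <;> split_ifs <;> omega

lemma pvFold_eq (l : List String) : ∀ b : Nat, b ≤ 4 →
    l.foldl (fun b t => pvInnerLoop t 0 pvBuckets b) b = min b (pvCasc l) := by
  induction l with
  | nil =>
      intro b hb
      have h : pvCasc [] = 4 := by simp [pvCasc]
      simp [h]; omega
  | cons t l ih =>
      intro b hb
      have h1 : min b (pvF t) ≤ 4 := by omega
      rw [List.foldl_cons, pvInnerLoop_eq t b hb, ih _ h1, pvCasc_cons]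
      omega

lemma pvTokens_eq (name code : Option String) : pvTokensB name code = pvTokensA name code := by
  unfold pvTokensA pvTokensB
  cases name <;> cases code <;> simp [List.filter] <;> split_ifs <;> simp_all

lemma pvCore (T : List String) :
    (if T.any (pvHit pvDisc) then "discontinued"
     else if T.any (pvHit pvComp) then "completed"
     else if T.any (pvHit pvPend) then "pending"
     else if T.any (pvHit pvAct) then "active"
     else if T ≠ [] then "other"
     else "unknown")
    = (if T = [] then "unknown"
       else
         let best := T.foldl (fun b t => pvInnerLoop t 0 pvBuckets b) pvBuckets.length
         if best < pvBuckets.length then (pvBuckets.getD best ("", [])).1 else "other") := by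
  cases T with
  | nil => simp
  | cons t l =>
      have hlen : pvBuckets.length = 4 := by simp [pvBuckets]
      simp only [hlen, if_neg (List.cons_ne_nil t l)]
      rw [pvFold_eq (t :: l) 4 (le_refl 4)]
      have h4 := pvCasc_le (t :: l)
      unfold pvCasc
      by_cases hd : (t :: l).any (pvHit pvDisc) <;>
        by_cases hc : (t :: l).any (pvHit pvComp) <;>
          by_cases hp : (t :: l).any (pvHit pvPend) <;>
            by_cases ha : (t :: l).any (pvHit pvAct) <;>
              simp [hd, hc, hp, ha, pvBuckets]

-- ===== VERDICT (by name: the statement is the Claim_ definition above) =====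
theorem order_status_bucket_py_spec : Claim_equal_order_status_bucket_py := by
  intro name code _
  unfold Spec_order_status_bucket_py order_status_bucket_py order_status_bucket_py_alt
  rw [pvTokens_eq]
  exact pvCore (pvTokensA name code)
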